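-- pv_equiv track=rewrite | github.com/SamanthaBrimberry/genie-world | genie_world/benchmarks/evaluator.py | _detect_order_by
-- ===== SOURCE A (Python) =====
-- def _detect_order_by(sql: str) -> bool:
--     """Return True if the SQL has a top-level ORDER BY clause (not inside a subquery).
--
--     Tracks parenthesis depth to distinguish top-level ORDER BY from subquery ORDER BY.
--     """
--     depth = 0
--     # Tokenize into parentheses and keyword spans
--     # We scan character by character tracking depth
--     sql_upper = sql.upper()
--     i = 0
--     n = len(sql_upper)
--
--     while i < n:
--         ch = sql_upper[i]
--         if ch == "(":
--             depth += 1
--             i += 1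
--         elif ch == ")":
--             depth -= 1
--             i += 1
--         elif depth == 0 and sql_upper[i : i + 8] == "ORDER BY":
--             return True
--         else:
--             i += 1
--
--     return False
-- ===== SOURCE B (Python) =====
-- def _detect_order_by(sql: str) -> bool:
--     """Return True if the SQL has a top-level ORDER BY clause (not inside a subquery)."""
--     depth = 0
--     buf = []
--     for ch in sql.upper():
--         if ch == "(":
--             depth += 1
--             buf.append("\x00")
--         elif ch == ")":
--             depth -= 1
--             buf.append("\x00")
--         elif depth == 0:
--             buf.append(ch)
--         else:
--             buf.append("\x00")
--     return "ORDER BY" in "".join(buf)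
-- ===== Notes on version B (the rewrite author's own statement) =====
-- stated objective: alternative
-- what changed: B builds a depth-masked copy of the uppercased SQL (non-top-level and parenthesis characters replaced by a sentinel) in one fold and then runs a single substring search for the keyword phrase, instead of A's per-position 8-char slice comparison inside the scan loop.
import Mathlib
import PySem

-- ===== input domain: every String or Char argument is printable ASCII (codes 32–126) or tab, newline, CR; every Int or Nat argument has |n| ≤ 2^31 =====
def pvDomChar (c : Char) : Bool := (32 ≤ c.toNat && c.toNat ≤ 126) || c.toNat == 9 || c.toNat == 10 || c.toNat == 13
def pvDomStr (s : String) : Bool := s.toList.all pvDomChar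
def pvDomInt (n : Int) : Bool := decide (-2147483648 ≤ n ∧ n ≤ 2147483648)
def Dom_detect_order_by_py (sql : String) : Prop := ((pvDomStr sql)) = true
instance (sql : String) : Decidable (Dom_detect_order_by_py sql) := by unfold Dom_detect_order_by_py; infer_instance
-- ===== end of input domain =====

-- B builds a depth-masked copy of the uppercased SQL and then does one plain
-- substring search for "ORDER BY"; a different decomposition of the same scan.

-- ===== PORT A =====
-- the while-loop of A: at each position, update depth on parens, otherwise
-- compare the 8-char slice at the current position with "ORDER BY" at depth 0
def detectLoopA : List Char → Int → Bool
  | [], _ => false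
  | c :: rest, depth =>
    if c = '(' then detectLoopA rest (depth + 1)
    else if c = ')' then detectLoopA rest (depth - 1)
    else if depth = 0 ∧ (c :: rest).take 8 = "ORDER BY".toList then true
    else detectLoopA rest depth

def detect_order_by_py (sql : String) : Bool :=
  detectLoopA (PySem.Str.upper sql).toList 0

-- ===== PORT B =====
-- one fold building the masked buffer, then a substring test
def detect_order_by_py_alt (sql : String) : Bool :=
  PySem.Chars.isIn "ORDER BY".toList
    ((PySem.Str.upper sql).toList.foldl
      (fun (s : Int × List Char) ch =>
        if ch = '(' then (s.1 + 1, s.2 ++ ['\x00'])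
        else if ch = ')' then (s.1 - 1, s.2 ++ ['\x00'])
        else if s.1 = 0 then (s.1, s.2 ++ [ch])
        else (s.1, s.2 ++ ['\x00']))
      ((0 : Int), ([] : List Char))).2

-- ===== PRECONDITION & SPEC =====
def Spec_detect_order_by_py (sql : String) (out : Bool) : Prop := out = detect_order_by_py_alt sql
instance (sql : String) (out : Bool) : Decidable (Spec_detect_order_by_py sql out) := by unfold Spec_detect_order_by_py; infer_instance

-- ===== CLAIM (what is proved, stated in full; the proofs are below) =====
def Claim_equal_detect_order_by_py : Prop := ∀ (sql : String), Dom_detect_order_by_py sql → Spec_detect_order_by_py sql (detect_order_by_py sql)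

-- ===== LEMMAS AND PROOFS =====

-- the masked buffer B builds, written as a direct recursion (proof helper)
def maskB : List Char → Int → List Char
  | [], _ => []
  | c :: rest, depth =>
    if c = '(' then '\x00' :: maskB rest (depth + 1)
    else if c = ')' then '\x00' :: maskB rest (depth - 1)
    else (if depth = 0 then c else '\x00') :: maskB rest depth

def patL : List Char := ['O', 'R', 'D', 'E', 'R', ' ', 'B', 'Y']

theorem pat_toList : "ORDER BY".toList = patL := rfl

-- B's fold produces buf ++ maskB cs d
theorem foldB_snd (cs : List Char) : ∀ (d : Int) (buf : List Char),
    (cs.foldl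
      (fun (s : Int × List Char) ch =>
        if ch = '(' then (s.1 + 1, s.2 ++ ['\x00'])
        else if ch = ')' then (s.1 - 1, s.2 ++ ['\x00'])
        else if s.1 = 0 then (s.1, s.2 ++ [ch])
        else (s.1, s.2 ++ ['\x00']))
      (d, buf)).2 = buf ++ maskB cs d := by
  induction cs with
  | nil => intro d buf; simp [maskB]
  | cons c rest ih =>
    intro d buf
    by_cases h1 : c = '('
    · simp [List.foldl, h1, maskB, ih]
    · by_cases h2 : c = ')'
      · simp [List.foldl, h2, maskB, ih]
      · by_cases h3 : d = 0 <;> simp [List.foldl, h1, h2, h3, maskB, ih]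

-- a pattern with no parens and no NUL is a prefix of maskB l 0 iff of l itself
theorem mask_prefix (p : List Char)
    (hp : ∀ c ∈ p, c ≠ '(' ∧ c ≠ ')' ∧ c ≠ '\x00') :
    ∀ l : List Char, (p <+: maskB l 0 ↔ p <+: l) := by
  induction p with
  | nil => intro l; simp
  | cons q p' ih =>
    intro l
    obtain ⟨hq1, hq2, hq3⟩ := hp q (by simp)
    cases l with
    | nil => simp [maskB]
    | cons c rest =>
      by_cases h1 : c = '('
      · simp [maskB, h1, List.cons_prefix_cons, hq1, hq3]
      · by_cases h2 : c = ')'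
        · simp [maskB, h2, List.cons_prefix_cons, hq2, hq3]
        · have := ih (fun x hx => hp x (by simp [hx])) rest
          simp [maskB, h1, h2, List.cons_prefix_cons, this]

theorem not_pat_prefix_nul (l : List Char) : ¬ patL <+: '\x00' :: l := by
  intro h
  rw [patL, List.cons_prefix_cons] at h
  exact absurd h.1 (by decide)

theorem pat_no_special : ∀ c ∈ patL, c ≠ '(' ∧ c ≠ ')' ∧ c ≠ '\x00' := by
  intro c hc
  fin_cases hc <;> exact ⟨by decide, by decide, by decide⟩

theorem loopA_iff (cs : List Char) : ∀ d : Int,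
    (detectLoopA cs d = true ↔ patL <:+: maskB cs d) := by
  induction cs with
  | nil => intro d; simp [detectLoopA, maskB, patL]
  | cons c rest ih =>
    intro d
    rw [detectLoopA, maskB]
    by_cases h1 : c = '('
    · simp [h1, List.infix_cons_iff, not_pat_prefix_nul, ih]
    · by_cases h2 : c = ')'
      · simp [h2, List.infix_cons_iff, not_pat_prefix_nul, ih]
      · by_cases hd : d = 0
        · subst hd
          have hpre : patL <+: c :: maskB rest 0 ↔ patL <+: c :: rest := by
            have := mask_prefix patL pat_no_special (c :: rest)
            rwa [maskB, if_neg h1, if_neg h2, if_pos rfl] at this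
          have htake : ((c :: rest).take 8 = "ORDER BY".toList) ↔ patL <+: c :: rest := by
            rw [pat_toList]
            constructor
            · intro h; rw [← h]; exact List.take_prefix _ _
            · intro h
              have h8 : patL.length = 8 := rfl
              have := List.prefix_iff_eq_take.1 h
              rw [h8] at this
              exact this.symm
          by_cases hm : (c :: rest).take 8 = "ORDER BY".toList
          · have hin : patL <:+: c :: maskB rest 0 :=
              (hpre.mpr (htake.1 hm)).isInfix
            simp [h1, h2, hm, hin]
          · simp only [h1, h2, hm, and_false, if_false,
              List.infix_cons_iff, ih (0 : Int)]
            constructor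
            · intro h; exact Or.inr h
            · rintro (h | h)
              · exact absurd (htake.2 (hpre.mp h)) hm
              · exact h
        · simp [h1, h2, hd, List.infix_cons_iff, not_pat_prefix_nul, ih]

-- ===== VERDICT (by name: the statement is the Claim_ definition above) =====
theorem detect_order_by_py_spec : Claim_equal_detect_order_by_py := by
  intro sql _
  unfold Spec_detect_order_by_py detect_order_by_py detect_order_by_py_alt
  rw [foldB_snd]
  simp only [List.nil_append]
  rw [Bool.eq_iff_iff, loopA_iff, PySem.Chars.isIn_iff_infix, pat_toList]
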